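-- pv_equiv track=rewrite | github.com/NP-LI/GetArticle | Multithread.py | delete_CRLF
-- ===== SOURCE A (Python) =====
-- def delete_CRLF(string):
--     string = string.split('\n')
--     text = ''
--     for s in string:
--         text += s
--     string = text
--
--     string = string.split('\r')
--     text = ''
--     for s in string:
--         text += s
--     return text.strip()
-- ===== SOURCE B (Python) =====
-- def delete_CRLF(string):
--     return ''.join(c for c in string if c != '\n' and c != '\r').strip()
-- ===== Notes on version B (the rewrite author's own statement) =====
-- stated objective: simpler
-- what changed: B replaces A's two split-then-concatenate passes (split on '\n', rejoin, split on '\r', rejoin) by a single character-level filtering pass followed by strip().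
import Mathlib
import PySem

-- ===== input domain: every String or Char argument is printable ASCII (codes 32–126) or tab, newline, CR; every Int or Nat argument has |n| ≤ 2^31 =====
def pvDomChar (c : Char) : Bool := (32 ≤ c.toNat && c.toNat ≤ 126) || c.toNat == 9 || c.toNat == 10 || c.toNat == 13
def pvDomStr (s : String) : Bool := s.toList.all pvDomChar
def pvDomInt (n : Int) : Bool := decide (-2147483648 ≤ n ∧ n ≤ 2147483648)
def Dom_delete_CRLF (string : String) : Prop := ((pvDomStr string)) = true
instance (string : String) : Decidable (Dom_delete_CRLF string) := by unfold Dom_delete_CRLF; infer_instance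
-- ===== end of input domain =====

-- B replaces A's two split-then-concatenate passes with one character filter + strip (simpler).
-- ===== PORT A =====
-- split on '\n', concatenate the pieces with a fold, split on '\r', concatenate, strip
def delete_CRLF (string : String) : String :=
  let parts1 := PySem.Chars.splitOn string.toList ['\n']
  let text1 := parts1.foldl (fun acc s => acc ++ s) []
  let parts2 := PySem.Chars.splitOn text1 ['\r']
  let text2 := parts2.foldl (fun acc s => acc ++ s) []
  String.ofList (PySem.Chars.strip text2)

-- ===== PORT B =====
-- single pass keeping characters other than '\n' and '\r', then strip
def delete_CRLF_alt (string : String) : String :=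
  String.ofList (PySem.Chars.strip (string.toList.filter (fun c => !(c == '\n' || c == '\r'))))

-- ===== PRECONDITION & SPEC =====
def Spec_delete_CRLF (string : String) (out : String) : Prop := out = delete_CRLF_alt string
instance (string : String) (out : String) : Decidable (Spec_delete_CRLF string out) := by unfold Spec_delete_CRLF; infer_instance

-- ===== CLAIM (what is proved, stated in full; the proofs are below) =====
def Claim_equal_delete_CRLF : Prop := ∀ (string : String), Dom_delete_CRLF string → Spec_delete_CRLF string (delete_CRLF string)

-- ===== LEMMAS AND PROOFS =====

theorem foldl_append_eq_flatten (xs : List (List Char)) (init : List Char) :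
    xs.foldl (fun acc s => acc ++ s) init = init ++ xs.flatten := by
  induction xs generalizing init with
  | nil => simp
  | cons x xs ih => simp [List.foldl_cons, ih]

theorem splitOn_go_flatten (c : Char) :
    ∀ (fuel : Nat) (l cur : List Char) (accs : List (List Char)),
      l.length ≤ fuel →
      (PySem.Chars.splitOn.go [c] fuel l cur accs).flatten =
        accs.reverse.flatten ++ cur.reverse ++ l.filter (fun x => x != c) := by
  intro fuel
  induction fuel with
  | zero =>
    intro l cur accs h
    have : l = [] := List.eq_nil_of_length_eq_zero (Nat.le_zero.mp h)
    subst this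
    simp [PySem.Chars.splitOn.go]
  | succ n ih =>
    intro l cur accs h
    cases l with
    | nil => simp [PySem.Chars.splitOn.go]
    | cons c' rest =>
      by_cases hc : c' = c
      · subst hc
        have hpre : List.isPrefixOf [c'] (c' :: rest) = true := by
          simp [List.isPrefixOf]
        simp only [PySem.Chars.splitOn.go, hpre, if_true]
        rw [ih _ [] (cur.reverse :: accs) (by simpa using Nat.le_of_succ_le_succ h)]
        simp
      · have hpre : List.isPrefixOf [c] (c' :: rest) = false := by
          simp [List.isPrefixOf]; exact fun hh => absurd hh.symm hc
        simp only [PySem.Chars.splitOn.go, hpre, if_false, Bool.false_eq_true]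
        rw [ih rest (c' :: cur) accs (Nat.le_of_succ_le_succ h)]
        simp [hc]

theorem splitOn_flatten (c : Char) (cs : List Char) :
    (PySem.Chars.splitOn cs [c]).flatten = cs.filter (fun x => x != c) := by
  unfold PySem.Chars.splitOn
  rw [splitOn_go_flatten c (cs.length + 1) cs [] [] (by omega)]
  simp

theorem delete_CRLF_core (cs : List Char) :
    ((PySem.Chars.splitOn
        ((PySem.Chars.splitOn cs ['\n']).foldl (fun acc s => acc ++ s) [])
        ['\r']).foldl (fun acc s => acc ++ s) []) =
      cs.filter (fun c => !(c == '\n' || c == '\r')) := by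
  rw [foldl_append_eq_flatten, List.nil_append, foldl_append_eq_flatten, List.nil_append,
      splitOn_flatten, splitOn_flatten, List.filter_filter]
  apply List.filter_congr
  intro x _
  cases h1 : x == '\n' <;> cases h2 : x == '\r' <;> simp [h1, h2, bne]

-- ===== VERDICT (by name: the statement is the Claim_ definition above) =====
theorem delete_CRLF_spec : Claim_equal_delete_CRLF := by
  intro s _
  unfold Spec_delete_CRLF delete_CRLF delete_CRLF_alt
  simp only []
  rw [delete_CRLF_core]
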